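-- pv_equiv track=rewrite | github.com/hy2jin/TIL | programmers/22년10월/로그인_성공.py | solution
-- ===== SOURCE A (Python) =====
-- def solution(id_pw, db):
--     ans = ["wrong pw", "fail"]
--     idx = -1
--     for a, b in db:
--         if a == id_pw[0]:
--             if b == id_pw[1]:
--                 return "login"
--             else:
--                 idx = 0
--         elif idx < 0:
--             idx = 1
--     return ans[idx]
-- ===== SOURCE B (Python) =====
-- def solution(id_pw, db):
--     if any(a == id_pw[0] and b == id_pw[1] for a, b in db):
--         return "login"
--     if any(a == id_pw[0] for a, b in db):
--         return "wrong pw"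
--     return "fail"
-- ===== Notes on version B (the rewrite author's own statement) =====
-- stated objective: idiomatic
-- what changed: Replaced A's single pass with a sentinel index into an answer table by two existential any() scans (full-credential match, then id-only match) with literal returns.
import Mathlib
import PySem

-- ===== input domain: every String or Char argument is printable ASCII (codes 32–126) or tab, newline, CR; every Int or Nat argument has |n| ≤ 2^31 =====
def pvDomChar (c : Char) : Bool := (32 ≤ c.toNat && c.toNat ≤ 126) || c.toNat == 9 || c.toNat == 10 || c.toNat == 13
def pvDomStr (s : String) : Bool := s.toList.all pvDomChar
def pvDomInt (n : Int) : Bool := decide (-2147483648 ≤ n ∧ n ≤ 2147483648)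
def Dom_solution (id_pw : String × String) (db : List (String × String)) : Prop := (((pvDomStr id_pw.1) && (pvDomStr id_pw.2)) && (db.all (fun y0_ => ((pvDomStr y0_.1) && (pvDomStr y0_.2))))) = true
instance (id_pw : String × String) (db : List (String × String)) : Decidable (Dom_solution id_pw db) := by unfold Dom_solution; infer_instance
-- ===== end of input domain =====

-- B replaces A's single sentinel-index pass by two idiomatic existential scans (objective: idiomatic).

-- ===== PORT A =====
-- A's for-loop with early return, carrying the mutable idx; afterwards ans[idx] via Python indexing (pyGet?, idx may be -1).
def solutionLoop (id_pw : String × String) : List (String × String) → Int → String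
  | [], idx => (PySem.List.pyGet? ["wrong pw", "fail"] idx).getD ""
  | (a, b) :: rest, idx =>
    if a = id_pw.1 then
      if b = id_pw.2 then "login" else solutionLoop id_pw rest 0
    else if idx < 0 then solutionLoop id_pw rest 1
    else solutionLoop id_pw rest idx

def solution (id_pw : String × String) (db : List (String × String)) : String :=
  solutionLoop id_pw db (-1)

-- ===== PORT B =====
def solution_alt (id_pw : String × String) (db : List (String × String)) : String :=
  if db.any (fun p => decide (p.1 = id_pw.1) && decide (p.2 = id_pw.2)) then "login"
  else if db.any (fun p => decide (p.1 = id_pw.1)) then "wrong pw"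
  else "fail"

-- ===== PRECONDITION & SPEC =====
def Spec_solution (id_pw : String × String) (db : List (String × String)) (out : String) : Prop := out = solution_alt id_pw db
instance (id_pw : String × String) (db : List (String × String)) (out : String) : Decidable (Spec_solution id_pw db out) := by unfold Spec_solution; infer_instance

-- ===== CLAIM (what is proved, stated in full; the proofs are below) =====
def Claim_equal_solution : Prop := ∀ (id_pw : String × String) (db : List (String × String)), Dom_solution id_pw db → Spec_solution id_pw db (solution id_pw db)

-- ===== LEMMAS AND PROOFS =====

-- Loop invariant: idx ∈ {-1, 0, 1}; idx = 0 records that a matching id with wrong pw was already seen.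
lemma solutionLoop_eq (id_pw : String × String) (db : List (String × String)) (idx : Int)
    (h : idx = -1 ∨ idx = 0 ∨ idx = 1) :
    solutionLoop id_pw db idx =
      if db.any (fun p => decide (p.1 = id_pw.1) && decide (p.2 = id_pw.2)) then "login"
      else if db.any (fun p => decide (p.1 = id_pw.1)) then "wrong pw"
      else if idx = 0 then "wrong pw" else "fail" := by
  induction db generalizing idx with
  | nil =>
    rcases h with h | h | h <;> subst h <;>
      simp [solutionLoop, PySem.List.pyGet?, PySem.List.pyIdx?]
  | cons hd tl ih =>
    obtain ⟨a, b⟩ := hd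
    by_cases ha : a = id_pw.1
    · by_cases hb : b = id_pw.2
      · simp [solutionLoop, ha, hb]
      · have := ih 0 (Or.inr (Or.inl rfl))
        simp [solutionLoop, ha, hb, this]
    · have hd : decide (a = id_pw.1) = false := by simp [ha]
      by_cases hlt : idx < 0
      · have h1 : idx = -1 := by omega
        have := ih 1 (Or.inr (Or.inr rfl))
        simp only [List.any_cons, hd, Bool.false_and, Bool.false_or]
        simp [solutionLoop, ha, this, h1]
      · have := ih idx h
        simp only [List.any_cons, hd, Bool.false_and, Bool.false_or]
        simp [solutionLoop, ha, hlt, this]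

-- ===== VERDICT (by name: the statement is the Claim_ definition above) =====
theorem solution_spec : Claim_equal_solution := by
  intro id_pw db _
  unfold Spec_solution solution solution_alt
  rw [solutionLoop_eq id_pw db (-1) (Or.inl rfl)]
  simp
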